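-- pv_equiv track=rewrite | github.com/Parking93/Algorithm | 파이썬100제/파이썬100제.py | solution
-- ===== SOURCE A (Python) =====
-- def solution(s, rule):
--     temp = 0
--     for i in s: #i:'D', s:"ABCDEF"
--         if i in rule:
--             if temp > rule.index(i): # rule.index(i): 문자가 rule에 있다면 몇 번째에 있는지(1 > 3)
--                 return '불가능'
--             temp = rule.index(i)
--     return '가능'
-- ===== SOURCE B (Python) =====
-- def solution(s, rule):
--     idx = [rule.index(c) for c in s if c in rule]
--     return '가능' if idx == sorted(idx) else '불가능'
-- ===== Notes on version B (the rewrite author's own statement) =====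
-- stated objective: alternative
-- what changed: Replaces A's single-pass max-index-so-far tracker with early return by materialising the list of rule positions and comparing it to its sorted version.
import Mathlib
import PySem

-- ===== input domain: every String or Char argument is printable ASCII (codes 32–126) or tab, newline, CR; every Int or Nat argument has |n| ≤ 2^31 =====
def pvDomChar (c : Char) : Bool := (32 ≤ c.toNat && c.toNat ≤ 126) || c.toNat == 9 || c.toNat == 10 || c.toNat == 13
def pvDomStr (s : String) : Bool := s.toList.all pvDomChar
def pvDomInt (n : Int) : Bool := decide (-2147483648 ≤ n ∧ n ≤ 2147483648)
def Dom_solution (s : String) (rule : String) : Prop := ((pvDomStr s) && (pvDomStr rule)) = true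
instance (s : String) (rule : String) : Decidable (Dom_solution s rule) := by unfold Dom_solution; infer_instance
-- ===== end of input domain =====

-- B is an alternative implementation (materialise the index list, compare with its sorted copy)
-- of the same behaviour; no speed claim.

-- ===== PORT A =====
-- early-returning loop: temp = max index seen so far; 'i in rule' / 'rule.index(i)'
-- are ported at the character level (i is one char), which is exact for single-char needles
def solutionGo (rule : List Char) : List Char → Nat → String
  | [], _ => "가능"
  | i :: rest, temp =>
    if rule.contains i then
      let k := (PySem.List.index? rule i).getD 0
      if temp > k then "불가능" else solutionGo rule rest k
    else solutionGo rule rest temp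

def solution (s : String) (rule : String) : String :=
  solutionGo rule.toList s.toList 0

-- ===== PORT B =====
def solution_alt (s : String) (rule : String) : String :=
  let idx : List Nat := s.toList.filterMap (fun c =>
    if rule.toList.contains c then some ((PySem.List.index? rule.toList c).getD 0) else none)
  if idx = PySem.List.sorted idx (fun x => x) false then "가능" else "불가능"

-- ===== PRECONDITION & SPEC =====
def Spec_solution (s : String) (rule : String) (out : String) : Prop := out = solution_alt s rule
instance (s : String) (rule : String) (out : String) : Decidable (Spec_solution s rule out) := by unfold Spec_solution; infer_instance

-- ===== CLAIM (what is proved, stated in full; the proofs are below) =====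
def Claim_equal_solution : Prop := ∀ (s : String) (rule : String), Dom_solution s rule → Spec_solution s rule (solution s rule)

-- ===== LEMMAS AND PROOFS =====

-- the list of rule-positions of the qualifying characters (B's idx list)
def idxList (rule : List Char) (l : List Char) : List Nat :=
  l.filterMap (fun c =>
    if rule.contains c then some ((PySem.List.index? rule c).getD 0) else none)

-- boolean "non-decreasing chain starting at t"
def okChain : Nat -> List Nat -> Bool
  | _, [] => true
  | t, k :: ks => decide (t <= k) && okChain k ks

-- A's loop answers per the chain check on the idx list
lemma solutionGo_eq_chain (rule : List Char) (l : List Char) (temp : Nat) :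
    solutionGo rule l temp =
      if okChain temp (idxList rule l) then "가능" else "불가능" := by
  induction l generalizing temp with
  | nil => simp [solutionGo, idxList, okChain]
  | cons i rest ih =>
    by_cases h : rule.contains i
    · simp only [solutionGo, idxList, List.filterMap_cons, h, if_pos, okChain]
      by_cases hk : temp > (PySem.List.index? rule i).getD 0
      · simp only [PySem.List.index?_eq_idxOf?] at hk
        simp [okChain, idxList, Nat.not_le_of_lt hk, hk]
      · push_neg at hk
        simp only [PySem.List.index?_eq_idxOf?] at hk
        simp [okChain, idxList, Nat.not_lt_of_le hk, hk, ih]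
    · simp only [solutionGo, idxList, List.filterMap_cons, h]
      simpa [idxList] using ih temp

lemma okChain_iff_isChain (t : Nat) (l : List Nat) :
    okChain t l = true ↔ List.IsChain (· ≤ ·) (t :: l) := by
  induction l generalizing t with
  | nil => simp [okChain]
  | cons k ks ih => simp [okChain, List.isChain_cons_cons, ih]

lemma okChain_zero_iff_pairwise (l : List Nat) :
    okChain 0 l = true ↔ l.Pairwise (· ≤ ·) := by
  rw [okChain_iff_isChain]
  cases l with
  | nil => simp
  | cons b t =>
    rw [List.isChain_cons_cons, List.isChain_iff_pairwise]
    simp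

lemma pairwise_iff_eq_sorted (l : List Nat) :
    l.Pairwise (· ≤ ·) ↔ l = PySem.List.sorted l (fun x => x) false := by
  constructor
  · intro h
    exact (PySem.List.sorted_eq_self_of_pairwise l (fun x => x) h).symm
  · intro h
    have hp := PySem.List.sorted_pairwise l (fun (x : Nat) => x)
    rw [← h] at hp
    exact hp

-- ===== VERDICT (by name: the statement is the Claim_ definition above) =====
theorem solution_spec : Claim_equal_solution := by
  intro s rule _
  unfold Spec_solution solution solution_alt
  rw [solutionGo_eq_chain]
  show (if okChain 0 (idxList rule.toList s.toList) then "가능" else "불가능")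
      = if idxList rule.toList s.toList =
            PySem.List.sorted (idxList rule.toList s.toList) (fun x => x) false
        then "가능" else "불가능"
  by_cases h : idxList rule.toList s.toList =
      PySem.List.sorted (idxList rule.toList s.toList) (fun x => x) false
  · rw [if_pos ((okChain_zero_iff_pairwise _).mpr ((pairwise_iff_eq_sorted _).mpr h)), if_pos h]
  · rw [if_neg (fun hc => h ((pairwise_iff_eq_sorted _).mp ((okChain_zero_iff_pairwise _).mp hc))),
      if_neg h]
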